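-- pv_equiv track=rewrite | github.com/livinm/sql-script-analyzer | sql_parser.py | findSubQuery
-- ===== SOURCE A (Python) =====
-- def findSubQuery(curr_sttm):
--     stack = []
--     curr_sttm = '(' + curr_sttm + ')'
--     for char in curr_sttm:
--         if char == '(':
--             #stack push
--             stack.append([])
--         elif char == ')':
--             yield ''.join(stack.pop())
--         else:
--             #stack peek
--             stack[-1].append(char)
--     return stack #return list()
-- ===== SOURCE B (Python) =====
-- def findSubQuery(curr_sttm):
--     # Recursive-descent generator: parses the nested structure with the call
--     # stack; inner groups are yielded first (via yield from), siblings left to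
--     # right. On an unmatched closing parenthesis (where A raises IndexError)
--     # it just skips.
--     s = '(' + curr_sttm + ')'
--     n = len(s)
--
--     def parse(i):
--         # position i is just after an opening parenthesis; read this group's
--         # direct characters, recursing on nested groups; on the closing
--         # parenthesis yield them; at end of input stop.
--         buf = []
--         while i < n and s[i] != ')':
--             if s[i] == '(':
--                 i = yield from parse(i + 1)
--             else:
--                 buf.append(s[i])
--                 i += 1
--         if i < n:
--             yield ''.join(buf)
--             i += 1
--         return i
--
--     i = 0
--     while i < n:
--         if s[i] == '(':
--             i = yield from parse(i + 1)
--         else: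
--             i += 1
-- ===== Notes on version B (the rewrite author's own statement) =====
-- stated objective: alternative
-- what changed: A runs a flat loop over the characters maintaining an explicit list-of-lists stack; B is a recursive-descent generator that parses each parenthesised group on the call stack, yielding inner groups first (yield from) and returning the position after the group's closing parenthesis.
-- outside the precondition, e.g. on findSubQuery(')'): A raises IndexError, B returns ['']
import Mathlib
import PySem

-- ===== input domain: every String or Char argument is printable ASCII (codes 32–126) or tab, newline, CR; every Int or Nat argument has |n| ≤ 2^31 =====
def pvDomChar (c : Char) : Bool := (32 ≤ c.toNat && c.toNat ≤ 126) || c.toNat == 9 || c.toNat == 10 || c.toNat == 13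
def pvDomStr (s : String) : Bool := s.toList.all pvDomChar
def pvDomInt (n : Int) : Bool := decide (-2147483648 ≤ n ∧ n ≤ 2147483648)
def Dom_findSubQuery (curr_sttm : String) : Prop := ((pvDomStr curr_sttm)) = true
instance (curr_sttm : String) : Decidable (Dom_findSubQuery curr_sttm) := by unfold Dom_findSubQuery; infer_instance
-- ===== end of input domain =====

-- B replaces A's explicit list-of-lists stack machine by a recursive-descent
-- parser on the call stack (alternative decomposition, same cost). Both are
-- generators; equivalence is about the yielded list (A's leftover-stack
-- StopIteration value is not observed by list()).

-- ===== PORT A =====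
-- A's loop over the wrapped string; the Python stack's top (stack[-1]) is the
-- HEAD of the Lean list. The two `[] => out` branches are Python's IndexError
-- (stack.pop / stack[-1] on an empty stack), excluded by Pre_.
def pvAgo : List Char → List (List Char) → List String → List String
  | [], _, out => out
  | c :: rest, stack, out =>
    if c = '(' then pvAgo rest ([] :: stack) out
    else if c = ')' then
      match stack with
      | [] => out
      | top :: stk => pvAgo rest stk (out ++ [String.mk top])
    else
      match stack with
      | [] => out
      | top :: stk => pvAgo rest ((top ++ [c]) :: stk) out

def findSubQuery (curr_sttm : String) : List String :=
  pvAgo ('(' :: curr_sttm.toList ++ [')']) [] []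

-- ===== PORT B =====
-- parse(i) of Source B: reads one group after its opening parenthesis; returns
-- (yields, rest of the input after the group). `fuel` is only a totality guard (always
-- larger than the remaining input, see pvBparse_len).
def pvBparse : Nat → List Char → List Char → List String × List Char
  | 0, cs, _ => ([], cs)
  | fuel + 1, cs, buf =>
    match cs with
    | [] => ([], [])
    | c :: rest =>
      if c = ')' then ([String.mk buf], rest)
      else if c = '(' then
        let p := pvBparse fuel rest []
        let q := pvBparse fuel p.2 buf
        (p.1 ++ q.1, q.2)
      else pvBparse fuel rest (buf ++ [c])

-- the top-level while loop of Source B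
def pvBtop : Nat → List Char → List String
  | 0, _ => []
  | fuel + 1, cs =>
    match cs with
    | [] => []
    | c :: rest =>
      if c = '(' then
        let p := pvBparse fuel rest []
        p.1 ++ pvBtop fuel p.2
      else pvBtop fuel rest

def findSubQuery_alt (curr_sttm : String) : List String :=
  pvBtop (('(' :: curr_sttm.toList ++ [')']).length + 1) ('(' :: curr_sttm.toList ++ [')'])

-- ===== PRECONDITION & SPEC =====
-- Pre_ excludes exactly the inputs on which A raises IndexError: those where
-- some character other than an opening parenthesis is reached with the paren
-- stack already empty, i.e. a prefix with more closing than opening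
-- parentheses before such a character, or in the whole string.
def Pre_findSubQuery (curr_sttm : String) : Prop :=
  (∀ i, i < curr_sttm.toList.length → curr_sttm.toList.getD i '(' ≠ '(' →
      (curr_sttm.toList.take i).count ')' ≤ (curr_sttm.toList.take i).count '(') ∧
  curr_sttm.toList.count ')' ≤ curr_sttm.toList.count '('
instance (curr_sttm : String) : Decidable (Pre_findSubQuery curr_sttm) := by
  unfold Pre_findSubQuery; infer_instance

def pvWitness_findSubQuery : String := "a(b)(c(d))"

def Spec_findSubQuery (curr_sttm : String) (out : List String) : Prop := out = findSubQuery_alt curr_sttm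
instance (curr_sttm : String) (out : List String) : Decidable (Spec_findSubQuery curr_sttm out) := by unfold Spec_findSubQuery; infer_instance

-- ===== CLAIM (what is proved, stated in full; the proofs are below) =====
def Claim_equal_findSubQuery : Prop := ∀ (curr_sttm : String), Dom_findSubQuery curr_sttm → Pre_findSubQuery curr_sttm → Spec_findSubQuery curr_sttm (findSubQuery curr_sttm)

-- ===== LEMMAS AND PROOFS =====

-- pvOk cs d: running A's machine over cs with current stack size d never
-- touches an empty stack (pop/peek always legal).
def pvOk : List Char → Nat → Prop
  | [], _ => True
  | c :: rest, d =>
    if c = '(' then pvOk rest (d + 1)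
    else if c = ')' then 1 ≤ d ∧ pvOk rest (d - 1)
    else 1 ≤ d ∧ pvOk rest d

theorem pvBparse_len : ∀ (f : Nat) (cs buf : List Char), (pvBparse f cs buf).2.length ≤ cs.length := by
  intro f
  induction f with
  | zero => intro cs buf; simp [pvBparse]
  | succ f ih =>
    intro cs buf
    match cs with
    | [] => simp [pvBparse]
    | c :: rest =>
      simp only [pvBparse]
      split
      · simp
      · split
        · simp only []
          have h1 := ih rest []
          have h2 := ih (pvBparse f rest []).2 buf
          simp only [List.length_cons]
          omega
        · have := ih rest (buf ++ [c])
          simp only [List.length_cons]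
          omega

theorem pvBparse_ok : ∀ (f : Nat) (cs buf : List Char) (d : Nat), cs.length < f →
    pvOk cs (d + 1) → pvOk (pvBparse f cs buf).2 d := by
  intro f
  induction f with
  | zero => intro cs buf d h; omega
  | succ f ih =>
    intro cs buf d h hok
    match cs with
    | [] => simp [pvBparse, pvOk]
    | c :: rest =>
      simp only [pvBparse]
      by_cases hc : c = ')'
      · subst hc
        simp only [pvOk] at hok
        norm_num at hok
        simpa using hok
      · by_cases ho : c = '('
        · simp only [if_neg hc, ho, if_pos rfl]
          simp only [pvOk, ho, if_pos rfl] at hok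
          simp only [List.length_cons] at h
          have h1 : pvOk (pvBparse f rest []).2 (d + 1) := ih rest [] (d + 1) (by omega) hok
          exact ih (pvBparse f rest []).2 buf d (by have := pvBparse_len f rest []; omega) h1
        · simp only [if_neg hc, if_neg ho]
          simp only [pvOk, if_neg ho, if_neg hc] at hok
          simp only [List.length_cons] at h
          exact ih rest (buf ++ [c]) d (by omega) hok.2

theorem pvAgo_parse : ∀ (f : Nat) (cs buf : List Char) (stk : List (List Char)) (out : List String),
    cs.length < f →
    pvAgo cs (buf :: stk) out = pvAgo (pvBparse f cs buf).2 stk (out ++ (pvBparse f cs buf).1) := by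
  intro f
  induction f with
  | zero => intro cs buf stk out h; omega
  | succ f ih =>
    intro cs buf stk out h
    match cs with
    | [] => simp [pvBparse, pvAgo]
    | c :: rest =>
      simp only [pvBparse, List.length_cons] at h ⊢
      by_cases hc : c = ')'
      · simp [pvAgo, hc]
      · by_cases ho : c = '('
        · simp only [if_neg hc, ho, if_pos rfl]
          have e1 : pvAgo ('(' :: rest) (buf :: stk) out = pvAgo rest ([] :: buf :: stk) out := by
            simp [pvAgo]
          rw [e1, ih rest [] (buf :: stk) out (by omega),
              ih (pvBparse f rest []).2 buf stk _ (by have := pvBparse_len f rest []; omega)]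
          simp [List.append_assoc]
        · simp only [if_neg hc, if_neg ho]
          have e1 : pvAgo (c :: rest) (buf :: stk) out = pvAgo rest ((buf ++ [c]) :: stk) out := by
            simp [pvAgo, ho, hc]
          rw [e1, ih rest (buf ++ [c]) stk out (by omega)]

theorem pvAgo_top : ∀ (f : Nat) (cs : List Char) (out : List String), cs.length < f →
    pvOk cs 0 → pvAgo cs [] out = out ++ pvBtop f cs := by
  intro f
  induction f with
  | zero => intro cs out h; omega
  | succ f ih =>
    intro cs out h hok
    match cs with
    | [] => simp [pvAgo, pvBtop]
    | c :: rest =>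
      simp only [List.length_cons] at h
      by_cases ho : c = '('
      · subst ho
        simp only [pvOk] at hok
        have e1 : pvAgo ('(' :: rest) [] out = pvAgo rest [[]] out := by simp [pvAgo]
        rw [e1, pvAgo_parse f rest [] [] out (by omega)]
        have hok2 : pvOk (pvBparse f rest []).2 0 := pvBparse_ok f rest [] 0 (by omega) hok
        rw [ih (pvBparse f rest []).2 _ (by have := pvBparse_len f rest []; omega) hok2]
        simp [pvBtop, List.append_assoc]
      · exfalso
        simp only [pvOk, if_neg ho] at hok
        by_cases hc : c = ')'
        · simp [hc] at hok
        · simp [hc] at hok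

theorem pvCount_ok : ∀ (cs : List Char) (d : Nat),
    (∀ i, i < cs.length → cs.getD i '(' ≠ '(' →
        (cs.take i).count ')' + 1 ≤ (cs.take i).count '(' + d) →
    cs.count ')' + 1 ≤ cs.count '(' + d →
    pvOk (cs ++ [')']) d := by
  intro cs
  induction cs with
  | nil =>
    intro d _ h2
    simp only [List.nil_append, pvOk]
    norm_num
    simpa using h2
  | cons c rest ih =>
    intro d h1 h2
    simp only [List.count_cons] at h2
    by_cases ho : c = '('
    · subst ho
      simp only [List.cons_append, pvOk]
      apply ih (d + 1)
      · intro i hi hne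
        have := h1 (i + 1) (by simpa using hi) (by simpa using hne)
        simp only [List.take_succ_cons, List.count_cons] at this
        simp at this
        omega
      · simp at h2
        omega
    · have hd : 1 ≤ d := by
        have := h1 0 (by simp) (by simpa using ho)
        simpa using this
      by_cases hc : c = ')'
      · subst hc
        simp only [List.cons_append, pvOk]
        norm_num
        refine ⟨hd, ih (d - 1) ?_ ?_⟩
        · intro i hi hne
          have := h1 (i + 1) (by simpa using hi) (by simpa using hne)
          simp only [List.take_succ_cons, List.count_cons] at this
          simp at this
          omega
        · simp at h2
          omega
      · simp only [List.cons_append, pvOk, if_neg ho, if_neg hc]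
        refine ⟨hd, ih d ?_ ?_⟩
        · intro i hi hne
          have := h1 (i + 1) (by simpa using hi) (by simpa using hne)
          simp only [List.take_succ_cons, List.count_cons] at this
          simp [hc, ho] at this
          omega
        · simp [hc, ho] at h2
          omega

-- ===== VERDICT (by name: the statement is the Claim_ definition above) =====
theorem findSubQuery_spec : Claim_equal_findSubQuery := by
  intro s _ hpre
  obtain ⟨h1, h2⟩ := hpre
  have hok : pvOk ('(' :: s.toList ++ [')']) 0 := by
    simp only [List.cons_append, pvOk]
    exact pvCount_ok s.toList 1 (fun i hi hne => by have := h1 i hi hne; omega) (by omega)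
  unfold Spec_findSubQuery findSubQuery findSubQuery_alt
  rw [pvAgo_top _ _ _ (Nat.lt_succ_self _) hok]
  simp
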